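-- pv_equiv track=rewrite | github.com/wyattowalsh/agents | skills/changelog-writer/scripts/changelog-formatter.py | format_github
-- ===== SOURCE A (Python) =====
-- def format_github(commits, version=None, release_date=None):
--     """Format commits as GitHub Releases style."""
--     ver = version or "Unreleased"
--     lines = [f"# {ver}", ""]
--
--     highlights = [c for c in commits if c["type"] == "feat"]
--     fixes = [c for c in commits if c["type"] == "fix"]
--     breaking = [c for c in commits if c.get("breaking")]
--     other = [c for c in commits if c["type"] not in ("feat", "fix") and not c.get("breaking")]
--
--     if breaking:
--         lines.extend(["## Breaking Changes", ""])
--         for c in breaking: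
--             lines.append(f"- {c['description']} (`{c['hash']}`)")
--         lines.append("")
--
--     if highlights:
--         lines.extend(["## What's New", ""])
--         for c in highlights:
--             scope = f"**{c['scope']}**: " if c.get("scope") else ""
--             lines.append(f"- {scope}{c['description']}")
--         lines.append("")
--
--     if fixes:
--         lines.extend(["## Bug Fixes", ""])
--         for c in fixes:
--             scope = f"**{c['scope']}**: " if c.get("scope") else ""
--             lines.append(f"- {scope}{c['description']}")
--         lines.append("")
--
--     if other:
--         lines.extend(["## Other Changes", ""])
--         for c in other:
--             lines.append(f"- {c['description']}")
--         lines.append("")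
--
--     # Contributors
--     authors = sorted(set(c.get("author", "") for c in commits))
--     if authors:
--         lines.extend(["## Contributors", ""])
--         for a in authors:
--             lines.append(f"- {a}")
--         lines.append("")
--
--     return "\n".join(lines)
-- ===== SOURCE B (Python) =====
-- def format_github(commits, version=None, release_date=None):
--     """Render every commit line once into (section-index, text) pairs, stable-sort the
--     pairs by section index, then emit headed runs of equal index (tag-sort-group)."""
--     HEADERS = ["Breaking Changes", "What's New", "Bug Fixes", "Other Changes", "Contributors"]
--
--     tagged = []
--     for c in commits:
--         if c.get("breaking"):
--             tagged.append((0, f"- {c['description']} (`{c['hash']}`)"))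
--         t = c["type"]
--         if t == "feat" or t == "fix":
--             scope = f"**{c['scope']}**: " if c.get("scope") else ""
--             tagged.append((1 if t == "feat" else 2, f"- {scope}{c['description']}"))
--         elif not c.get("breaking"):
--             tagged.append((3, f"- {c['description']}"))
--     for a in sorted({c.get("author", "") for c in commits}):
--         tagged.append((4, f"- {a}"))
--
--     tagged.sort(key=lambda p: p[0])  # stable: original order kept inside each section
--
--     out = [f"# {version or 'Unreleased'}", ""]
--     j = 0
--     while j < len(tagged):
--         k = j + 1
--         while k < len(tagged) and tagged[k][0] == tagged[j][0]:
--             k += 1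
--         out += ["## " + HEADERS[tagged[j][0]], ""] + [line for _, line in tagged[j:k]] + [""]
--         j = k
--     return "\n".join(out)
-- ===== Notes on version B (the rewrite author's own statement) =====
-- stated objective: alternative
-- what changed: B replaces A's four filtered passes with hand-written section blocks by a tag-sort-group algorithm: one pass renders every output line as a (section-index, text) pair, a stable sort by section index brings the sections together, and a single run-grouping loop emits each non-empty run under its header.
import Mathlib
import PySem

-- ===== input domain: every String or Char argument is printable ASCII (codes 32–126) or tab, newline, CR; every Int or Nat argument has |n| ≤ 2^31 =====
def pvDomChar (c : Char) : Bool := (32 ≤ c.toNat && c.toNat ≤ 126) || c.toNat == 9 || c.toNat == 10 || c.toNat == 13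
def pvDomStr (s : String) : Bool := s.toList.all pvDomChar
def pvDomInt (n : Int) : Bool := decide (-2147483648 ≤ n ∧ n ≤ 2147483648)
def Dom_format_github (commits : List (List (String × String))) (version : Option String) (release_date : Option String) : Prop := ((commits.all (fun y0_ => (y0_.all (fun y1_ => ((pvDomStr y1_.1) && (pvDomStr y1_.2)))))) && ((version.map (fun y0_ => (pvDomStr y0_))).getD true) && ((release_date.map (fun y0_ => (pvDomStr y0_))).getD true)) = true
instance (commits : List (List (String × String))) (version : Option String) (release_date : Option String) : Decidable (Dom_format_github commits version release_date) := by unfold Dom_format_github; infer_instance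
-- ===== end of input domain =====

-- B is a different algorithm (objective: alternative): it renders every line once as a
-- (section-index, text) pair, stable-sorts the pairs by section index, and emits headed runs,
-- instead of A's per-section filtered passes; same output.

-- shared dict primitive: first-match association-list lookup (Python dict.get)
def fgGet? (c : List (String × String)) (k : String) : Option String :=
  (c.find? (fun p => p.1 == k)).map (fun p => p.2)

def fgGetD (c : List (String × String)) (k : String) (d : String) : String :=
  (fgGet? c k).getD d

-- ===== PORT A =====
def format_github (commits : List (List (String × String))) (version : Option String) (release_date : Option String) : String :=
  let ver := if (version.getD "") == "" then "Unreleased" else version.getD ""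
  let lines : List String := ["# " ++ ver, ""]
  let highlights := commits.filter (fun c => fgGetD c "type" "" == "feat")
  let fixes := commits.filter (fun c => fgGetD c "type" "" == "fix")
  let breaking := commits.filter (fun c => fgGetD c "breaking" "" != "")
  let other := commits.filter (fun c =>
    !(fgGetD c "type" "" == "feat") && !(fgGetD c "type" "" == "fix") && !(fgGetD c "breaking" "" != ""))
  let lines := if breaking ≠ [] then
      (breaking.foldl (fun acc c => acc ++ ["- " ++ fgGetD c "description" "" ++ " (`" ++ fgGetD c "hash" "" ++ "`)"])
        (lines ++ ["## Breaking Changes", ""])) ++ [""]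
    else lines
  let lines := if highlights ≠ [] then
      (highlights.foldl (fun acc c =>
          let scope := if fgGetD c "scope" "" != "" then "**" ++ fgGetD c "scope" "" ++ "**: " else ""
          acc ++ ["- " ++ scope ++ fgGetD c "description" ""])
        (lines ++ ["## What's New", ""])) ++ [""]
    else lines
  let lines := if fixes ≠ [] then
      (fixes.foldl (fun acc c =>
          let scope := if fgGetD c "scope" "" != "" then "**" ++ fgGetD c "scope" "" ++ "**: " else ""
          acc ++ ["- " ++ scope ++ fgGetD c "description" ""])
        (lines ++ ["## Bug Fixes", ""])) ++ [""]
    else lines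
  let lines := if other ≠ [] then
      (other.foldl (fun acc c => acc ++ ["- " ++ fgGetD c "description" ""])
        (lines ++ ["## Other Changes", ""])) ++ [""]
    else lines
  let authors := PySem.List.sorted (PySem.Set.ofList (commits.map (fun c => fgGetD c "author" ""))) (fun x => x) false
  let lines := if authors ≠ [] then
      (authors.foldl (fun acc a => acc ++ ["- " ++ a]) (lines ++ ["## Contributors", ""])) ++ [""]
    else lines
  PySem.Str.join "\n" lines

-- ===== PORT B =====
-- HEADERS[i] of Source B
def fgHdr : Nat → String
  | 0 => "Breaking Changes"
  | 1 => "What's New"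
  | 2 => "Bug Fixes"
  | 3 => "Other Changes"
  | _ => "Contributors"

-- the (section-index, text) pairs one commit contributes (body of Source B's first loop)
def fgTags (c : List (String × String)) : List (Nat × String) :=
  (if fgGetD c "breaking" "" != "" then
      [((0 : Nat), "- " ++ fgGetD c "description" "" ++ " (`" ++ fgGetD c "hash" "" ++ "`)")]
    else []) ++
  (let t := fgGetD c "type" ""
   if t == "feat" || t == "fix" then
     let scope := if fgGetD c "scope" "" != "" then "**" ++ fgGetD c "scope" "" ++ "**: " else ""
     [((if t == "feat" then (1 : Nat) else 2), "- " ++ scope ++ fgGetD c "description" "")]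
   else if !(fgGetD c "breaking" "" != "") then
     [((3 : Nat), "- " ++ fgGetD c "description" "")]
   else [])

-- Source B's while loop: emit a headed run of equal section indices, recurse on the rest
def fgEmit : List (Nat × String) → List String
  | [] => []
  | p :: rest =>
      ("## " ++ fgHdr p.1) :: "" :: p.2 ::
        ((rest.takeWhile (fun q => q.1 == p.1)).map Prod.snd ++ [""] ++
          fgEmit (rest.dropWhile (fun q => q.1 == p.1)))
termination_by l => l.length
decreasing_by
  simp only [List.length_cons]
  exact Nat.lt_succ_of_le (List.length_dropWhile_le _ _)

def format_github_alt (commits : List (List (String × String))) (version : Option String) (release_date : Option String) : String :=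
  let tagged :=
    (commits.foldl (fun acc c => acc ++ fgTags c) []) ++
      (PySem.List.sorted (PySem.Set.ofList (commits.map (fun c => fgGetD c "author" ""))) (fun x => x) false).map
        (fun a => ((4 : Nat), "- " ++ a))
  let tagged := PySem.List.sorted tagged (fun p => p.1) false
  let ver := if (version.getD "") == "" then "Unreleased" else version.getD ""
  PySem.Str.join "\n" (["# " ++ ver, ""] ++ fgEmit tagged)

-- ===== PRECONDITION & SPEC =====
-- Pre_ excludes exactly the inputs where Python A raises KeyError: every commit must carry
-- "type" and "description", and a commit with a truthy "breaking" must also carry "hash".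
def Pre_format_github (commits : List (List (String × String))) (version : Option String) (release_date : Option String) : Prop :=
  ∀ c ∈ commits, (fgGet? c "type").isSome ∧ (fgGet? c "description").isSome ∧
    (fgGetD c "breaking" "" ≠ "" → (fgGet? c "hash").isSome)
instance (commits : List (List (String × String))) (version : Option String) (release_date : Option String) : Decidable (Pre_format_github commits version release_date) := by unfold Pre_format_github; infer_instance

def pvWitness_format_github : (List (List (String × String))) × Option String × Option String :=
  ([[("type", "feat"), ("description", "add x"), ("author", "ann")],
    [("type", "fix"), ("description", "fix y"), ("breaking", "yes"), ("hash", "abc1234"), ("author", "bob")]],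
   some "1.2.0", none)

def Spec_format_github (commits : List (List (String × String))) (version : Option String) (release_date : Option String) (out : String) : Prop := out = format_github_alt commits version release_date
instance (commits : List (List (String × String))) (version : Option String) (release_date : Option String) (out : String) : Decidable (Spec_format_github commits version release_date out) := by unfold Spec_format_github; infer_instance

-- ===== CLAIM (what is proved, stated in full; the proofs are below) =====
def Claim_equal_format_github : Prop := ∀ (commits : List (List (String × String))) (version : Option String) (release_date : Option String), Dom_format_github commits version release_date → Pre_format_github commits version release_date → Spec_format_github commits version release_date (format_github commits version release_date)

-- ===== LEMMAS AND PROOFS =====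

-- a rendered section: header, blank, items, blank — or nothing when empty
def fgSec (hdr : String) (items : List String) : List String :=
  if items = [] then [] else ["## " ++ hdr, ""] ++ items ++ [""]

-- abbreviations for A's four commit buckets and the rendered lines (proof-local)
def fgBr (c : List (String × String)) : String :=
  "- " ++ fgGetD c "description" "" ++ " (`" ++ fgGetD c "hash" "" ++ "`)"
def fgSc (c : List (String × String)) : String :=
  "- " ++ (if fgGetD c "scope" "" != "" then "**" ++ fgGetD c "scope" "" ++ "**: " else "") ++
    fgGetD c "description" ""
def fgPl (c : List (String × String)) : String := "- " ++ fgGetD c "description" ""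

-- A's output, normalised to a concatenation of sections
set_option maxHeartbeats 1000000 in
theorem fgA_normal (commits : List (List (String × String))) (version release_date : Option String) :
    format_github commits version release_date =
      PySem.Str.join "\n"
        (["# " ++ (if (version.getD "") == "" then "Unreleased" else version.getD ""), ""] ++
          fgSec "Breaking Changes" ((commits.filter (fun c => fgGetD c "breaking" "" != "")).map fgBr) ++
          fgSec "What's New" ((commits.filter (fun c => fgGetD c "type" "" == "feat")).map fgSc) ++
          fgSec "Bug Fixes" ((commits.filter (fun c => fgGetD c "type" "" == "fix")).map fgSc) ++
          fgSec "Other Changes" ((commits.filter (fun c =>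
            !(fgGetD c "type" "" == "feat") && !(fgGetD c "type" "" == "fix") &&
              !(fgGetD c "breaking" "" != ""))).map fgPl) ++
          fgSec "Contributors" ((PySem.List.sorted (PySem.Set.ofList (commits.map (fun c => fgGetD c "author" ""))) (fun x => x) false).map (fun a => "- " ++ a))) := by
  unfold format_github fgBr fgSc fgPl
  simp only [PySem.List.foldl_append_singleton_eq_map]
  by_cases hbr : commits.filter (fun c => fgGetD c "breaking" "" != "") = [] <;>
  by_cases hfe : commits.filter (fun c => fgGetD c "type" "" == "feat") = [] <;>
  by_cases hfx : commits.filter (fun c => fgGetD c "type" "" == "fix") = [] <;>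
  by_cases hot : commits.filter (fun c =>
      !(fgGetD c "type" "" == "feat") && !(fgGetD c "type" "" == "fix") &&
        !(fgGetD c "breaking" "" != "")) = [] <;>
  by_cases hau : PySem.List.sorted (PySem.Set.ofList (commits.map (fun c => fgGetD c "author" ""))) (fun x => x) false = [] <;>
  simp [fgSec, hbr, hfe, hfx, hot, hau, List.map_eq_nil_iff, List.append_assoc]

-- ---- stable insertion sort by key partitions by key value ----

theorem fg_insertBy_append {α : Type} (before : α → α → Bool) (x : α) (pre suf : List α)
    (h : ∀ y ∈ pre, before x y = false) :
    PySem.List.insertBy before x (pre ++ suf) = pre ++ PySem.List.insertBy before x suf := by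
  induction pre with
  | nil => simp
  | cons a tl ih =>
      simp [PySem.List.insertBy, h a (List.mem_cons_self),
        ih (fun y hy => h y (List.mem_cons_of_mem _ hy))]

theorem fg_insertBy_all_before {α : Type} (before : α → α → Bool) (x : α) (ys : List α)
    (h : ∀ y ∈ ys, before x y = true) :
    PySem.List.insertBy before x ys = x :: ys := by
  cases ys with
  | nil => simp [PySem.List.insertBy]
  | cons a tl => simp [PySem.List.insertBy, h a (List.mem_cons_self)]

theorem fg_insert_blocks (x : Nat × String) (pre suf : List (Nat × String))
    (hpre : ∀ y ∈ pre, ¬ x.1 < y.1) (hsuf : ∀ y ∈ suf, x.1 < y.1) :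
    PySem.List.insertBy (fun a b => decide (a.1 < b.1)) x (pre ++ suf) = pre ++ x :: suf := by
  rw [fg_insertBy_append _ _ _ _ (fun y hy => by simp [hpre y hy]),
    fg_insertBy_all_before _ _ _ (fun y hy => by simp [hsuf y hy])]

theorem fg_sortfold_partition :
    ∀ (l b0 b1 b2 b3 b4 : List (Nat × String)),
      (∀ p ∈ l, p.1 ≤ 4) → (∀ p ∈ b0, p.1 = 0) → (∀ p ∈ b1, p.1 = 1) → (∀ p ∈ b2, p.1 = 2) →
      (∀ p ∈ b3, p.1 = 3) → (∀ p ∈ b4, p.1 = 4) →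
      l.foldl (fun acc x => PySem.List.insertBy (fun a b => decide (a.1 < b.1)) x acc)
          (b0 ++ (b1 ++ (b2 ++ (b3 ++ b4)))) =
        (b0 ++ l.filter (fun p => p.1 == 0)) ++
          ((b1 ++ l.filter (fun p => p.1 == 1)) ++
            ((b2 ++ l.filter (fun p => p.1 == 2)) ++
              ((b3 ++ l.filter (fun p => p.1 == 3)) ++
                (b4 ++ l.filter (fun p => p.1 == 4))))) := by
  intro l
  induction l with
  | nil => intro b0 b1 b2 b3 b4 _ _ _ _ _ _; simp
  | cons x l ih =>
    intro b0 b1 b2 b3 b4 hl h0 h1 h2 h3 h4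
    have hx : x.1 ≤ 4 := hl x (List.mem_cons_self)
    have hl' : ∀ p ∈ l, p.1 ≤ 4 := fun p hp => hl p (List.mem_cons_of_mem _ hp)
    obtain ⟨k, s⟩ := x
    simp only [List.foldl_cons]
    interval_cases k
    · rw [fg_insert_blocks _ b0 (b1 ++ (b2 ++ (b3 ++ b4)))
          (fun y hy => by have := h0 y hy; omega)
          (fun y hy => by
            simp only [List.mem_append] at hy
            rcases hy with h | h | h | h
            · have := h1 y h; omega
            · have := h2 y h; omega
            · have := h3 y h; omega
            · have := h4 y h; omega)]
      rw [show b0 ++ ((0, s) :: (b1 ++ (b2 ++ (b3 ++ b4)))) =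
            (b0 ++ [((0 : Nat), s)]) ++ (b1 ++ (b2 ++ (b3 ++ b4))) from by simp]
      rw [ih (b0 ++ [((0 : Nat), s)]) b1 b2 b3 b4 hl'
        (fun p hp => by rcases List.mem_append.1 hp with h | h
                        · exact h0 p h
                        · simp at h; simp [h]) h1 h2 h3 h4]
      simp [List.filter_cons, List.append_assoc]
    · rw [show b0 ++ (b1 ++ (b2 ++ (b3 ++ b4))) = (b0 ++ b1) ++ (b2 ++ (b3 ++ b4)) from by simp,
        fg_insert_blocks _ (b0 ++ b1) (b2 ++ (b3 ++ b4))
          (fun y hy => by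
            rcases List.mem_append.1 hy with h | h
            · have := h0 y h; omega
            · have := h1 y h; omega)
          (fun y hy => by
            simp only [List.mem_append] at hy
            rcases hy with h | h | h
            · have := h2 y h; omega
            · have := h3 y h; omega
            · have := h4 y h; omega)]
      rw [show (b0 ++ b1) ++ ((1, s) :: (b2 ++ (b3 ++ b4))) =
            b0 ++ ((b1 ++ [((1 : Nat), s)]) ++ (b2 ++ (b3 ++ b4))) from by simp]
      rw [ih b0 (b1 ++ [((1 : Nat), s)]) b2 b3 b4 hl' h0
        (fun p hp => by rcases List.mem_append.1 hp with h | h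
                        · exact h1 p h
                        · simp at h; simp [h]) h2 h3 h4]
      simp [List.filter_cons, List.append_assoc]
    · rw [show b0 ++ (b1 ++ (b2 ++ (b3 ++ b4))) = (b0 ++ (b1 ++ b2)) ++ (b3 ++ b4) from by simp,
        fg_insert_blocks _ (b0 ++ (b1 ++ b2)) (b3 ++ b4)
          (fun y hy => by
            simp only [List.mem_append] at hy
            rcases hy with h | h | h
            · have := h0 y h; omega
            · have := h1 y h; omega
            · have := h2 y h; omega)
          (fun y hy => by
            rcases List.mem_append.1 hy with h | h
            · have := h3 y h; omega
            · have := h4 y h; omega)]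
      rw [show (b0 ++ (b1 ++ b2)) ++ ((2, s) :: (b3 ++ b4)) =
            b0 ++ (b1 ++ ((b2 ++ [((2 : Nat), s)]) ++ (b3 ++ b4))) from by simp]
      rw [ih b0 b1 (b2 ++ [((2 : Nat), s)]) b3 b4 hl' h0 h1
        (fun p hp => by rcases List.mem_append.1 hp with h | h
                        · exact h2 p h
                        · simp at h; simp [h]) h3 h4]
      simp [List.filter_cons, List.append_assoc]
    · rw [show b0 ++ (b1 ++ (b2 ++ (b3 ++ b4))) = (b0 ++ (b1 ++ (b2 ++ b3))) ++ b4 from by simp,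
        fg_insert_blocks _ (b0 ++ (b1 ++ (b2 ++ b3))) b4
          (fun y hy => by
            simp only [List.mem_append] at hy
            rcases hy with h | h | h | h
            · have := h0 y h; omega
            · have := h1 y h; omega
            · have := h2 y h; omega
            · have := h3 y h; omega)
          (fun y hy => by have := h4 y hy; omega)]
      rw [show (b0 ++ (b1 ++ (b2 ++ b3))) ++ ((3, s) :: b4) =
            b0 ++ (b1 ++ (b2 ++ ((b3 ++ [((3 : Nat), s)]) ++ b4))) from by simp]
      rw [ih b0 b1 b2 (b3 ++ [((3 : Nat), s)]) b4 hl' h0 h1 h2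
        (fun p hp => by rcases List.mem_append.1 hp with h | h
                        · exact h3 p h
                        · simp at h; simp [h]) h4]
      simp [List.filter_cons, List.append_assoc]
    · rw [show b0 ++ (b1 ++ (b2 ++ (b3 ++ b4))) = (b0 ++ (b1 ++ (b2 ++ (b3 ++ b4)))) ++ [] from by simp,
        fg_insert_blocks _ (b0 ++ (b1 ++ (b2 ++ (b3 ++ b4)))) []
          (fun y hy => by
            simp only [List.mem_append] at hy
            rcases hy with h | h | h | h | h
            · have := h0 y h; omega
            · have := h1 y h; omega
            · have := h2 y h; omega
            · have := h3 y h; omega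
            · have := h4 y h; omega)
          (fun y hy => by simp at hy)]
      rw [show (b0 ++ (b1 ++ (b2 ++ (b3 ++ b4)))) ++ [((4 : Nat), s)] =
            b0 ++ (b1 ++ (b2 ++ (b3 ++ (b4 ++ [((4 : Nat), s)])))) from by simp]
      rw [ih b0 b1 b2 b3 (b4 ++ [((4 : Nat), s)]) hl' h0 h1 h2 h3
        (fun p hp => by rcases List.mem_append.1 hp with h | h
                        · exact h4 p h
                        · simp at h; simp [h])]
      simp [List.filter_cons, List.append_assoc]

theorem fg_sorted_partition (l : List (Nat × String)) (h : ∀ p ∈ l, p.1 ≤ 4) :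
    PySem.List.sorted l (fun p => p.1) false =
      l.filter (fun p => p.1 == 0) ++
        (l.filter (fun p => p.1 == 1) ++
          (l.filter (fun p => p.1 == 2) ++
            (l.filter (fun p => p.1 == 3) ++ l.filter (fun p => p.1 == 4)))) := by
  have := fg_sortfold_partition l [] [] [] [] []
    h (by simp) (by simp) (by simp) (by simp) (by simp)
  simpa [PySem.List.sorted_eq_foldl_insertBy] using this

-- ---- computing the five blocks of the tagged list ----

theorem fg_foldl_tags (commits : List (List (String × String))) :
    commits.foldl (fun acc c => acc ++ fgTags c) [] = commits.flatMap fgTags := by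
  simp [PySem.List.foldl_append_eq_flatMap, List.flatMap_def]

theorem fg_filter_flatMap {α β : Type} (P : β → Bool) (l : List α) (f : α → List β) :
    (l.flatMap f).filter P = l.flatMap (fun c => (f c).filter P) := by
  induction l with
  | nil => simp
  | cons a tl ih => simp [List.flatMap_cons, List.filter_append, ih]

theorem fg_flatMap_opt {α β : Type} (l : List α) (p : α → Bool) (f : α → β) :
    l.flatMap (fun c => if p c then [f c] else []) = (l.filter p).map f := by
  induction l with
  | nil => simp
  | cons a tl ih =>
      by_cases h : p a = true <;> simp [List.flatMap_cons, List.filter_cons, h, ih]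

theorem fgTags_filter0 (c : List (String × String)) :
    (fgTags c).filter (fun p => p.1 == 0) =
      if fgGetD c "breaking" "" != "" then [((0 : Nat), fgBr c)] else [] := by
  unfold fgTags fgBr
  by_cases hb : (fgGetD c "breaking" "" != "") = true <;>
  by_cases hf : (fgGetD c "type" "" == "feat") = true <;>
  by_cases hx : (fgGetD c "type" "" == "fix") = true <;>
  simp_all [List.filter_append, List.filter_cons]

theorem fgTags_filter1 (c : List (String × String)) :
    (fgTags c).filter (fun p => p.1 == 1) =
      if fgGetD c "type" "" == "feat" then [((1 : Nat), fgSc c)] else [] := by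
  unfold fgTags fgSc
  by_cases hb : (fgGetD c "breaking" "" != "") = true <;>
  by_cases hf : (fgGetD c "type" "" == "feat") = true <;>
  by_cases hx : (fgGetD c "type" "" == "fix") = true <;>
  simp_all [List.filter_append, List.filter_cons]

theorem fgTags_filter2 (c : List (String × String)) :
    (fgTags c).filter (fun p => p.1 == 2) =
      if fgGetD c "type" "" == "fix" then [((2 : Nat), fgSc c)] else [] := by
  unfold fgTags fgSc
  by_cases hb : (fgGetD c "breaking" "" != "") = true <;>
  by_cases hf : (fgGetD c "type" "" == "feat") = true <;>
  by_cases hx : (fgGetD c "type" "" == "fix") = true <;>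
  simp_all [List.filter_append, List.filter_cons]

theorem fgTags_filter3 (c : List (String × String)) :
    (fgTags c).filter (fun p => p.1 == 3) =
      if !(fgGetD c "type" "" == "feat") && !(fgGetD c "type" "" == "fix") &&
          !(fgGetD c "breaking" "" != "") then [((3 : Nat), fgPl c)] else [] := by
  unfold fgTags fgPl
  by_cases hb : (fgGetD c "breaking" "" != "") = true <;>
  by_cases hf : (fgGetD c "type" "" == "feat") = true <;>
  by_cases hx : (fgGetD c "type" "" == "fix") = true <;>
  simp_all [List.filter_append, List.filter_cons]

theorem fgTags_filter4 (c : List (String × String)) :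
    (fgTags c).filter (fun p => p.1 == 4) = [] := by
  unfold fgTags
  by_cases hb : (fgGetD c "breaking" "" != "") = true <;>
  by_cases hf : (fgGetD c "type" "" == "feat") = true <;>
  by_cases hx : (fgGetD c "type" "" == "fix") = true <;>
  simp_all [List.filter_append, List.filter_cons]

theorem fgTags_key_le (c : List (String × String)) (p : Nat × String) (hp : p ∈ fgTags c) :
    p.1 ≤ 3 := by
  unfold fgTags at hp
  rcases List.mem_append.1 hp with h | h <;>
    by_cases hff : fgGetD c "type" "" = "feat" <;>
    by_cases hfx : fgGetD c "type" "" = "fix" <;> split_ifs at h <;> simp_all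

-- ---- emitting blocks ----

theorem fg_takeWhile_all_append {α : Type} (p : α → Bool) (l r : List α)
    (h : ∀ y ∈ l, p y = true) : (l ++ r).takeWhile p = l ++ r.takeWhile p := by
  induction l with
  | nil => simp
  | cons a tl ih =>
      simp [List.takeWhile_cons, h a (List.mem_cons_self),
        ih (fun y hy => h y (List.mem_cons_of_mem _ hy))]

theorem fg_dropWhile_all_append {α : Type} (p : α → Bool) (l r : List α)
    (h : ∀ y ∈ l, p y = true) : (l ++ r).dropWhile p = r.dropWhile p := by
  induction l with
  | nil => simp
  | cons a tl ih =>
      simp [List.dropWhile_cons, h a (List.mem_cons_self),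
        ih (fun y hy => h y (List.mem_cons_of_mem _ hy))]

theorem fg_takeWhile_none {α : Type} (p : α → Bool) (l : List α)
    (h : ∀ y ∈ l, p y = false) : l.takeWhile p = [] := by
  cases l with
  | nil => rfl
  | cons a tl => simp [List.takeWhile_cons, h a (List.mem_cons_self)]

theorem fg_dropWhile_none {α : Type} (p : α → Bool) (l : List α)
    (h : ∀ y ∈ l, p y = false) : l.dropWhile p = l := by
  cases l with
  | nil => rfl
  | cons a tl => simp [List.dropWhile_cons, h a (List.mem_cons_self)]

theorem fgEmit_block (k : Nat) (blk rest : List (Nat × String))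
    (hb : ∀ p ∈ blk, p.1 = k) (hr : ∀ p ∈ rest, p.1 ≠ k) :
    fgEmit (blk ++ rest) = fgSec (fgHdr k) (blk.map Prod.snd) ++ fgEmit rest := by
  cases blk with
  | nil => simp [fgSec]
  | cons p tl =>
      have hk : p.1 = k := hb p (List.mem_cons_self)
      rw [List.cons_append, fgEmit]
      rw [fg_takeWhile_all_append (fun q => q.1 == p.1) tl rest
            (fun y hy => by simp [hb y (List.mem_cons_of_mem _ hy), hk]),
          fg_takeWhile_none (fun q => q.1 == p.1) rest
            (fun y hy => by simp [hk]; exact hr y hy),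
          fg_dropWhile_all_append (fun q => q.1 == p.1) tl rest
            (fun y hy => by simp [hb y (List.mem_cons_of_mem _ hy), hk]),
          fg_dropWhile_none (fun q => q.1 == p.1) rest
            (fun y hy => by simp [hk]; exact hr y hy)]
      simp [fgSec, hk]

-- members of a tagging map have that index
theorem fg_mem_tagmap {α : Type} (i : Nat) (f : α → String) (l : List α) (p : Nat × String)
    (hp : p ∈ l.map (fun c => (i, f c))) : p.1 = i := by
  simp only [List.mem_map] at hp
  obtain ⟨c, _, rfl⟩ := hp
  rfl

-- B's output, normalised to the same concatenation of sections
set_option maxHeartbeats 1000000 in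
theorem fgB_normal (commits : List (List (String × String))) (version release_date : Option String) :
    format_github_alt commits version release_date =
      PySem.Str.join "\n"
        (["# " ++ (if (version.getD "") == "" then "Unreleased" else version.getD ""), ""] ++
          fgSec "Breaking Changes" ((commits.filter (fun c => fgGetD c "breaking" "" != "")).map fgBr) ++
          fgSec "What's New" ((commits.filter (fun c => fgGetD c "type" "" == "feat")).map fgSc) ++
          fgSec "Bug Fixes" ((commits.filter (fun c => fgGetD c "type" "" == "fix")).map fgSc) ++
          fgSec "Other Changes" ((commits.filter (fun c =>
            !(fgGetD c "type" "" == "feat") && !(fgGetD c "type" "" == "fix") &&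
              !(fgGetD c "breaking" "" != ""))).map fgPl) ++
          fgSec "Contributors" ((PySem.List.sorted (PySem.Set.ofList (commits.map (fun c => fgGetD c "author" ""))) (fun x => x) false).map (fun a => "- " ++ a))) := by
  unfold format_github_alt
  simp only [fg_foldl_tags]
  set authors := PySem.List.sorted (PySem.Set.ofList (commits.map (fun c => fgGetD c "author" ""))) (fun x => x) false with hagen
  set tagged := commits.flatMap fgTags ++ authors.map (fun a => ((4 : Nat), "- " ++ a)) with htag
  have hbound : ∀ p ∈ tagged, p.1 ≤ 4 := by
    intro p hp
    rcases List.mem_append.1 hp with h | h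
    · obtain ⟨c, _, hc⟩ := List.mem_flatMap.1 h
      have := fgTags_key_le c p hc; omega
    · rw [fg_mem_tagmap 4 _ _ _ h]
  rw [fg_sorted_partition tagged hbound]
  have hmapfilter : ∀ (i : Nat), (4 : Nat) ≠ i →
      (authors.map (fun a => ((4 : Nat), "- " ++ a))).filter (fun p => p.1 == i) = [] := by
    intro i hi
    apply List.filter_eq_nil_iff.2
    intro p hp
    rw [fg_mem_tagmap 4 _ _ _ hp]
    simpa using hi
  have hf0 : tagged.filter (fun p => p.1 == 0) =
      (commits.filter (fun c => fgGetD c "breaking" "" != "")).map (fun c => ((0 : Nat), fgBr c)) := by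
    rw [htag, List.filter_append, hmapfilter 0 (by omega), List.append_nil,
      fg_filter_flatMap]
    simp only [fgTags_filter0]
    rw [fg_flatMap_opt]
  have hf1 : tagged.filter (fun p => p.1 == 1) =
      (commits.filter (fun c => fgGetD c "type" "" == "feat")).map (fun c => ((1 : Nat), fgSc c)) := by
    rw [htag, List.filter_append, hmapfilter 1 (by omega), List.append_nil,
      fg_filter_flatMap]
    simp only [fgTags_filter1]
    rw [fg_flatMap_opt]
  have hf2 : tagged.filter (fun p => p.1 == 2) =
      (commits.filter (fun c => fgGetD c "type" "" == "fix")).map (fun c => ((2 : Nat), fgSc c)) := by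
    rw [htag, List.filter_append, hmapfilter 2 (by omega), List.append_nil,
      fg_filter_flatMap]
    simp only [fgTags_filter2]
    rw [fg_flatMap_opt]
  have hf3 : tagged.filter (fun p => p.1 == 3) =
      (commits.filter (fun c =>
        !(fgGetD c "type" "" == "feat") && !(fgGetD c "type" "" == "fix") &&
          !(fgGetD c "breaking" "" != ""))).map (fun c => ((3 : Nat), fgPl c)) := by
    rw [htag, List.filter_append, hmapfilter 3 (by omega), List.append_nil,
      fg_filter_flatMap]
    simp only [fgTags_filter3]
    rw [fg_flatMap_opt]
  have hf4 : tagged.filter (fun p => p.1 == 4) =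
      authors.map (fun a => ((4 : Nat), "- " ++ a)) := by
    rw [htag, List.filter_append, fg_filter_flatMap]
    simp only [fgTags_filter4]
    have hnil : commits.flatMap (fun _ => ([] : List (Nat × String))) = [] := by simp
    rw [hnil, List.nil_append]
    apply List.filter_eq_self.2
    intro p hp
    rw [fg_mem_tagmap 4 _ _ _ hp]
    simp
  rw [hf0, hf1, hf2, hf3, hf4]
  rw [show List.map (fun a => ((4 : Nat), "- " ++ a)) authors =
        List.map (fun a => ((4 : Nat), "- " ++ a)) authors ++ ([] : List (Nat × String)) from by simp]
  rw [fgEmit_block 0 _ _ (fg_mem_tagmap 0 _ _)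
        (fun p hp => by
          simp only [List.mem_append] at hp
          rcases hp with h | h | h | h | h
          · rw [fg_mem_tagmap 1 _ _ _ h]; omega
          · rw [fg_mem_tagmap 2 _ _ _ h]; omega
          · rw [fg_mem_tagmap 3 _ _ _ h]; omega
          · rw [fg_mem_tagmap 4 _ _ _ h]; omega
          · simp at h),
      fgEmit_block 1 _ _ (fg_mem_tagmap 1 _ _)
        (fun p hp => by
          simp only [List.mem_append] at hp
          rcases hp with h | h | h | h
          · rw [fg_mem_tagmap 2 _ _ _ h]; omega
          · rw [fg_mem_tagmap 3 _ _ _ h]; omega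
          · rw [fg_mem_tagmap 4 _ _ _ h]; omega
          · simp at h),
      fgEmit_block 2 _ _ (fg_mem_tagmap 2 _ _)
        (fun p hp => by
          simp only [List.mem_append] at hp
          rcases hp with h | h | h
          · rw [fg_mem_tagmap 3 _ _ _ h]; omega
          · rw [fg_mem_tagmap 4 _ _ _ h]; omega
          · simp at h),
      fgEmit_block 3 _ _ (fg_mem_tagmap 3 _ _)
        (fun p hp => by
          rcases List.mem_append.1 hp with h | h
          · rw [fg_mem_tagmap 4 _ _ _ h]; omega
          · simp at h),
      fgEmit_block 4 _ _ (fg_mem_tagmap 4 _ _) (fun p hp => by simp at hp)]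
  simp only [fgEmit, List.map_map, List.append_assoc, List.append_nil, fgHdr]
  rfl

-- ===== VERDICT (by name: the statement is the Claim_ definition above) =====
theorem format_github_spec : Claim_equal_format_github := by
  intro commits version release_date _ _
  unfold Spec_format_github
  rw [fgA_normal, fgB_normal]
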